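-- pv_equiv track=rewrite | github.com/PhalanxHead/wyb_partA | parta.py | prepare_board
-- ===== SOURCE A (Python) =====
-- def prepare_board(board):
--     """
--     Transforms the text board into an array.
--     Returns:         board_array - A 2D array of the characters in the board.
--     ________________________
--     Input Variables:
--         board:         A String representing the board as defined in the spec.
--     """
--     board_array = []
--     row = []
--
--     for char in board:
--
--         if char == "\n":
--             board_array.append(row)
--             row = []
--
--             """ Ignore Spaces """
--         elif char != " ":
--             row.append(char)
--
--     return board_array
-- ===== SOURCE B (Python) =====
-- def prepare_board(board):
--     # Line-oriented: split on newlines ([:-1] keeps only newline-terminated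
--     # lines, as A drops any trailing content after the last newline),
--     # then drop spaces within each line.
--     lines = board.split("\n")[:-1]
--     return [[c for c in line if c != " "] for line in lines]
-- ===== Notes on version B (the rewrite author's own statement) =====
-- stated objective: idiomatic
-- what changed: Replaces A's flat char-by-char state machine with a manually flushed row accumulator by a line-oriented pass: split the string on newlines (dropping the unterminated trailing segment, as A does) and filter spaces within each line.
import Mathlib
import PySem

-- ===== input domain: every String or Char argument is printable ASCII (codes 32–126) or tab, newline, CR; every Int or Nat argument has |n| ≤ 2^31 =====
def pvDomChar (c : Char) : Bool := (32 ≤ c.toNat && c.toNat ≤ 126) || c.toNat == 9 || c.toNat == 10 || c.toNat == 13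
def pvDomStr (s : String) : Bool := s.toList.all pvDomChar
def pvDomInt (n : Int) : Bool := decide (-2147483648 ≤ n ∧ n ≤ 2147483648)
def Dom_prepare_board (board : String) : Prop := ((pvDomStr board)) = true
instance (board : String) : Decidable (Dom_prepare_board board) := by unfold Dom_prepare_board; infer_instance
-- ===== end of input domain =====

-- B replaces A's flat char-by-char state machine by a line-oriented pass
-- (split on newlines, then filter spaces in each line) — objective: idiomatic.

-- ===== PORT A =====
-- A: single fold over the characters, state = (board_array, pending row);
-- a newline flushes the row, a space is skipped, anything else is appended.
def prepare_board (board : String) : List (List String) :=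
  (board.toList.foldl
    (fun (st : List (List String) × List String) char =>
      if char = '\n' then (st.1 ++ [st.2], [])
      else if char ≠ ' ' then (st.1, st.2 ++ [String.ofList [char]])
      else st)
    ([], [])).1

-- ===== PORT B =====
-- B: lines = board.split("\n")[:-1]; [[c for c in line if c != " "] for line in lines]
def prepare_board_alt (board : String) : List (List String) :=
  let lines : List (List Char) :=
    PySem.List.slice (PySem.Chars.splitOn board.toList ['\n']) none (some (-1))
  lines.map (fun line => (line.filter (fun c => c ≠ ' ')).map (fun c => String.ofList [c]))

-- ===== PRECONDITION & SPEC =====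
def Spec_prepare_board (board : String) (out : List (List String)) : Prop := out = prepare_board_alt board
instance (board : String) (out : List (List String)) : Decidable (Spec_prepare_board board out) := by unfold Spec_prepare_board; infer_instance

-- ===== CLAIM (what is proved, stated in full; the proofs are below) =====
def Claim_equal_prepare_board : Prop := ∀ (board : String), Dom_prepare_board board → Spec_prepare_board board (prepare_board board)

-- ===== LEMMAS AND PROOFS =====

-- Proof-only helpers: a structural description of splitting on '\n'.
def pvSplitNL : List Char → List (List Char)
  | [] => [[]]
  | c :: cs =>
    if c = '\n' then [] :: pvSplitNL cs
    else match pvSplitNL cs with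
      | [] => [[c]]          -- unreachable: pvSplitNL is never []
      | h :: t => (c :: h) :: t

-- completed rows produced by A's fold from remaining chars with pending row
def pvG : List Char → List String → List (List String)
  | [], _ => []
  | c :: cs, row =>
    if c = '\n' then row :: pvG cs []
    else pvG cs (if c = ' ' then row else row ++ [String.ofList [c]])

def pvConsHead (pre : List String) : List (List String) → List (List String)
  | [] => []
  | x :: xs => (pre ++ x) :: xs

def pvF (line : List Char) : List String :=
  (line.filter (fun c => c ≠ ' ')).map (fun c => String.ofList [c])

theorem pvSplitNL_ne_nil (cs : List Char) : pvSplitNL cs ≠ [] := by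
  cases cs with
  | nil => simp [pvSplitNL]
  | cons c cs =>
    simp only [pvSplitNL]
    split
    · simp
    · split
      · simp
      · simp

theorem pvGo_eq (cs : List Char) : ∀ (fuel : Nat) (cur : List Char) (acc : List (List Char)),
    cs.length ≤ fuel →
    PySem.Chars.splitOn.go ['\n'] fuel cs cur acc
      = acc.reverse ++ (match pvSplitNL cs with
          | [] => [cur.reverse]
          | h :: t => (cur.reverse ++ h) :: t) := by
  induction cs with
  | nil =>
    intro fuel cur acc _
    cases fuel <;> simp [PySem.Chars.splitOn.go, pvSplitNL]
  | cons c rest ih =>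
    intro fuel cur acc hf
    cases fuel with
    | zero => simp at hf
    | succ f =>
      have hrest : rest.length ≤ f := by simpa using hf
      by_cases hc : c = '\n'
      · subst hc
        have hpre : List.isPrefixOf ['\n'] ('\n' :: rest) = true := by
          simp [List.isPrefixOf]
        rw [show PySem.Chars.splitOn.go ['\n'] (f+1) ('\n' :: rest) cur acc
              = PySem.Chars.splitOn.go ['\n'] f (List.drop (['\n'] : List Char).length ('\n' :: rest)) [] (cur.reverse :: acc) by
            simp [PySem.Chars.splitOn.go, hpre]]
        simp only [List.length_singleton, List.drop_succ_cons, List.drop_zero]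
        rw [ih f [] (cur.reverse :: acc) hrest]
        cases h : pvSplitNL rest with
        | nil => exact absurd h (pvSplitNL_ne_nil rest)
        | cons h0 t => simp [pvSplitNL, h]
      · have hpre : List.isPrefixOf ['\n'] (c :: rest) = false := by
          simp [List.isPrefixOf]
          exact fun h => hc h.symm
        rw [show PySem.Chars.splitOn.go ['\n'] (f+1) (c :: rest) cur acc
              = PySem.Chars.splitOn.go ['\n'] f rest (c :: cur) acc by
            simp [PySem.Chars.splitOn.go, hpre]]
        rw [ih f (c :: cur) acc hrest]
        cases h : pvSplitNL rest with
        | nil => exact absurd h (pvSplitNL_ne_nil rest)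
        | cons h0 t => simp [pvSplitNL, hc, h]

theorem pvSplitOn_eq (cs : List Char) : PySem.Chars.splitOn cs ['\n'] = pvSplitNL cs := by
  rw [PySem.Chars.splitOn, pvGo_eq cs (cs.length + 1) [] [] (by omega)]
  cases h : pvSplitNL cs with
  | nil => exact absurd h (pvSplitNL_ne_nil cs)
  | cons h0 t => simp

theorem pvFold_fst (cs : List Char) : ∀ (ba : List (List String)) (row : List String),
    (cs.foldl
      (fun (st : List (List String) × List String) char =>
        if char = '\n' then (st.1 ++ [st.2], [])
        else if char ≠ ' ' then (st.1, st.2 ++ [String.ofList [char]])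
        else st)
      (ba, row)).1 = ba ++ pvG cs row := by
  induction cs with
  | nil => intro ba row; simp [pvG]
  | cons c cs ih =>
    intro ba row
    by_cases hc : c = '\n'
    · subst hc; simp only [List.foldl_cons, pvG, ih]
      simp
    · by_cases hs : c = ' '
      · subst hs
        simp only [List.foldl_cons, pvG, if_neg hc, ih]
        simp
      · simp only [List.foldl_cons, pvG, if_neg hc, ne_eq, hs,
          not_false_eq_true, if_pos, ih]
        simp

theorem pvG_eq (cs : List Char) : ∀ (row : List String),
    pvG cs row = pvConsHead row ((pvSplitNL cs).dropLast.map pvF) := by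
  induction cs with
  | nil => intro row; simp [pvG, pvSplitNL, pvConsHead]
  | cons c cs ih =>
    intro row
    by_cases hc : c = '\n'
    · subst hc
      simp only [pvG, pvSplitNL, ih]
      cases h : pvSplitNL cs with
      | nil => exact absurd h (pvSplitNL_ne_nil cs)
      | cons h0 t =>
        cases t with
        | nil => simp [pvConsHead, pvF]
        | cons t0 ts => simp [pvConsHead, pvF]
    · have : pvG (c :: cs) row
          = pvG cs (if c = ' ' then row else row ++ [String.ofList [c]]) := by
        simp [pvG, hc]
      rw [this, ih]
      cases h : pvSplitNL cs with
      | nil => exact absurd h (pvSplitNL_ne_nil cs)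
      | cons h0 t =>
        cases t with
        | nil =>
          simp only [pvSplitNL, if_neg hc, h]
          simp [pvConsHead]
        | cons t0 ts =>
          simp only [pvSplitNL, if_neg hc, h]
          by_cases hs : c = ' '
          · subst hs
            simp [pvConsHead, pvF, List.filter]
          · simp [pvConsHead, pvF, List.filter, hs]

-- ===== VERDICT (by name: the statement is the Claim_ definition above) =====
theorem prepare_board_spec : Claim_equal_prepare_board := by
  intro board _
  unfold Spec_prepare_board prepare_board prepare_board_alt
  rw [pvFold_fst, pvG_eq, pvSplitOn_eq]
  have hsl : PySem.List.slice (pvSplitNL board.toList) none (some (-1))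
      = (pvSplitNL board.toList).dropLast := by
    simp [PySem.List.slice, List.dropLast_eq_take]
  rw [hsl]
  cases h : (pvSplitNL board.toList).dropLast with
  | nil => simp [pvConsHead, h, pvF]
  | cons x xs => simp [pvConsHead, h, pvF]
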